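-- pv_equiv track=rewrite | github.com/paulonteri/data-structures-and-algorithms | solutions/Math Tricks/reaching_points.py | tryReach
-- ===== SOURCE A (Python) =====
-- def tryReach(x, y,  x2,  y2):
--     while x2 != 0:
--         # y2 - y % x2 are the number of subtractions needed to reach y, if there are 0 subtractions to get to y, then we have found y
--         if x2 == x and y2 >= y and (y2 - y) % x2 == 0:
--             return True
--         else:
--             y2 %= x2
--             # swap
--             x2, y2 = y2, x2
--             # original x match original x2
--             x, y = y, x
--     return False
-- ===== SOURCE B (Python) =====
-- def tryReach(x, y, x2, y2):
--     # Mutual recursion on the reduction step: (x, y) never move or swap;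
--     # _even checks the state against (x, y), _odd against (y, x), and the
--     # "same number of subtractions" test is phrased as equality of residues.
--     return _even(x, y, x2, y2)
--
-- def _even(x, y, x2, y2):
--     if x2 == 0:
--         return False
--     if x == x2 and y <= y2 and y % x2 == y2 % x2:
--         return True
--     return _odd(x, y, y2 % x2, x2)
--
-- def _odd(x, y, x2, y2):
--     if x2 == 0:
--         return False
--     if y == x2 and x <= y2 and x % x2 == y2 % x2:
--         return True
--     return _even(x, y, y2 % x2, x2)
-- ===== Notes on version B (the rewrite author's own statement) =====
-- stated objective: alternative
-- what changed: B replaces A's while loop that mutates and swaps all four variables each step by a pair of mutually recursive functions in which (x, y) are fixed and never swapped, each function carrying its own specialised check, with the reachability test rephrased from remainder-of-difference ((y2-y)%x2==0) to equality of residues (y%x2==y2%x2).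
import Mathlib
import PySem

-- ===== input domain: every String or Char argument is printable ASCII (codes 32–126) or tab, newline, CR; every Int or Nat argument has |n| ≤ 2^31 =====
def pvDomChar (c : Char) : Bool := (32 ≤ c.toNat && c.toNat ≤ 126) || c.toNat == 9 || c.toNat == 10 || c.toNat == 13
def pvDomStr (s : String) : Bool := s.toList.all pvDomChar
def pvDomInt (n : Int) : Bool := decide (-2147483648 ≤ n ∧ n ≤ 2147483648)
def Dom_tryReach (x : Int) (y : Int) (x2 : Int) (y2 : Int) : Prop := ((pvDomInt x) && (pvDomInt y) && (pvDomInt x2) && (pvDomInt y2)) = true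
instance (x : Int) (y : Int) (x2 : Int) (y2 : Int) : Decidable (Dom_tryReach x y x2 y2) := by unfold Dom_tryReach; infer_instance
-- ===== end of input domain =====

-- B replaces A's swap-everything while loop by two mutually recursive functions with
-- fixed (x, y) and a residue-equality reachability test (objective: alternative decomposition).

-- termination helper (cited by both ports' decreasing_by): Python's % shrinks |divisor|
theorem pv_mod_natAbs_lt (a b : Int) (hb : b ≠ 0) :
    (PySem.Int.mod a b).natAbs < b.natAbs := by
  rcases lt_trichotomy b 0 with h | h | h
  · have := PySem.Int.mod_neg_bounds a h
    omega
  · exact absurd h hb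
  · have h1 := PySem.Int.mod_nonneg a h
    have h2 := PySem.Int.mod_lt a h
    omega

-- ===== PORT A =====
def tryReach (x : Int) (y : Int) (x2 : Int) (y2 : Int) : Bool :=
  if hx : x2 = 0 then false
  else if x2 = x ∧ y ≤ y2 ∧ PySem.Int.mod (y2 - y) x2 = 0 then true
  else tryReach y x (PySem.Int.mod y2 x2) x2
termination_by x2.natAbs
decreasing_by exact pv_mod_natAbs_lt y2 x2 hx

-- ===== PORT B =====
mutual
def pvEven (x : Int) (y : Int) (x2 : Int) (y2 : Int) : Bool :=
  if hx : x2 = 0 then false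
  else if x = x2 ∧ y ≤ y2 ∧ PySem.Int.mod y x2 = PySem.Int.mod y2 x2 then true
  else pvOdd x y (PySem.Int.mod y2 x2) x2
termination_by x2.natAbs
decreasing_by exact pv_mod_natAbs_lt y2 x2 hx

def pvOdd (x : Int) (y : Int) (x2 : Int) (y2 : Int) : Bool :=
  if hx : x2 = 0 then false
  else if y = x2 ∧ x ≤ y2 ∧ PySem.Int.mod x x2 = PySem.Int.mod y2 x2 then true
  else pvEven x y (PySem.Int.mod y2 x2) x2
termination_by x2.natAbs
decreasing_by exact pv_mod_natAbs_lt y2 x2 hx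
end

def tryReach_alt (x : Int) (y : Int) (x2 : Int) (y2 : Int) : Bool :=
  pvEven x y x2 y2

-- ===== PRECONDITION & SPEC =====
def Spec_tryReach (x : Int) (y : Int) (x2 : Int) (y2 : Int) (out : Bool) : Prop := out = tryReach_alt x y x2 y2
instance (x : Int) (y : Int) (x2 : Int) (y2 : Int) (out : Bool) : Decidable (Spec_tryReach x y x2 y2 out) := by unfold Spec_tryReach; infer_instance

-- ===== CLAIM (what is proved, stated in full; the proofs are below) =====
def Claim_equal_tryReach : Prop := ∀ (x : Int) (y : Int) (x2 : Int) (y2 : Int), Dom_tryReach x y x2 y2 → Spec_tryReach x y x2 y2 (tryReach x y x2 y2)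

-- ===== LEMMAS AND PROOFS =====

-- residue equality is divisibility of the difference (the two condition phrasings agree)
theorem pv_mod_eq_iff (a b n : Int) (hn : n ≠ 0) :
    PySem.Int.mod a n = PySem.Int.mod b n ↔ PySem.Int.mod (b - a) n = 0 := by
  rw [PySem.Int.mod_eq_zero_iff_dvd]
  have ha := PySem.Int.floordiv_mul_add_mod a n
  have hb := PySem.Int.floordiv_mul_add_mod b n
  constructor
  · intro h
    exact ⟨PySem.Int.floordiv b n - PySem.Int.floordiv a n, by linarith [h]⟩
  · intro h
    have hdvd : n ∣ (PySem.Int.mod b n - PySem.Int.mod a n) := by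
      obtain ⟨c, hc⟩ := h
      exact ⟨c - PySem.Int.floordiv b n + PySem.Int.floordiv a n, by linarith⟩
    have hz : PySem.Int.mod b n - PySem.Int.mod a n = 0 := by
      refine Int.eq_zero_of_dvd_of_natAbs_lt_natAbs hdvd ?_
      rcases lt_trichotomy n 0 with h' | h' | h'
      · have b1 := PySem.Int.mod_neg_bounds a h'
        have b2 := PySem.Int.mod_neg_bounds b h'
        omega
      · exact absurd h' hn
      · have a1 := PySem.Int.mod_nonneg a h'
        have a2 := PySem.Int.mod_lt a h'
        have b1 := PySem.Int.mod_nonneg b h'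
        have b2 := PySem.Int.mod_lt b h'
        omega
    omega

theorem pv_main (n : Nat) (x2 : Int) (hn : x2.natAbs ≤ n) (x y y2 : Int) :
    pvEven x y x2 y2 = tryReach x y x2 y2 ∧ pvOdd x y x2 y2 = tryReach y x x2 y2 := by
  induction n generalizing x2 y2 x y with
  | zero =>
      have hx : x2 = 0 := by omega
      refine ⟨?_, ?_⟩
      · rw [pvEven, tryReach]; simp [hx]
      · rw [pvOdd, tryReach]; simp [hx]
  | succ n ih =>
      by_cases hx : x2 = 0
      · refine ⟨?_, ?_⟩
        · rw [pvEven, tryReach]; simp [hx]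
        · rw [pvOdd, tryReach]; simp [hx]
      · have hrec := ih (PySem.Int.mod y2 x2)
          (by have := pv_mod_natAbs_lt y2 x2 hx; omega) x y x2
        refine ⟨?_, ?_⟩
      -- even position: check against (x, y)
        · rw [pvEven, tryReach]
          simp only [hx, dif_neg, not_false_iff]
          have hiff : (x = x2 ∧ y ≤ y2 ∧ PySem.Int.mod y x2 = PySem.Int.mod y2 x2)
              ↔ (x2 = x ∧ y ≤ y2 ∧ PySem.Int.mod (y2 - y) x2 = 0) := by
            have := pv_mod_eq_iff y y2 x2 hx
            constructor <;> intro h <;> exact ⟨by tauto, h.2.1, by tauto⟩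
          by_cases h : x2 = x ∧ y ≤ y2 ∧ PySem.Int.mod (y2 - y) x2 = 0
          · rw [if_pos (hiff.mpr h), if_pos h]
          · rw [if_neg (fun hb => h (hiff.mp hb)), if_neg h]
            exact hrec.2
      -- odd position: check against (y, x)
        · rw [pvOdd, tryReach]
          simp only [hx, dif_neg, not_false_iff]
          have hiff : (y = x2 ∧ x ≤ y2 ∧ PySem.Int.mod x x2 = PySem.Int.mod y2 x2)
              ↔ (x2 = y ∧ x ≤ y2 ∧ PySem.Int.mod (y2 - x) x2 = 0) := by
            have := pv_mod_eq_iff x y2 x2 hx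
            constructor <;> intro h <;> exact ⟨by tauto, h.2.1, by tauto⟩
          by_cases h : x2 = y ∧ x ≤ y2 ∧ PySem.Int.mod (y2 - x) x2 = 0
          · rw [if_pos (hiff.mpr h), if_pos h]
          · rw [if_neg (fun hb => h (hiff.mp hb)), if_neg h]
            exact hrec.1

-- ===== VERDICT (by name: the statement is the Claim_ definition above) =====
theorem tryReach_spec : Claim_equal_tryReach := by
  intro x y x2 y2 _
  unfold Spec_tryReach tryReach_alt
  exact ((pv_main x2.natAbs x2 le_rfl x y y2).1).symm
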